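-- pv_equiv track=rewrite | github.com/slovb/aoc_2023 | 12/second.py | reformat_group
-- ===== SOURCE A (Python) =====
-- def reformat_group(group):
--     options = []
--     count = 0
--     for c in group:
--         if c == "#":
--             count += 1
--         else:
--             if count > 0:
--                 options.append(count)
--                 count = 0
--             options.append(None)
--     if count > 0:
--         options.append(count)
--     return options
-- ===== SOURCE B (Python) =====
-- def reformat_group(group):
--     # tokenize into maximal '#' runs and single non-'#' characters, then map
--     tokens = []
--     i = 0
--     n = len(group)
--     while i < n:
--         if group[i] == '#':
--             j = i
--             while j < n and group[j] == '#':
--                 j += 1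
--             tokens.append(group[i:j])
--             i = j
--         else:
--             tokens.append(group[i])
--             i += 1
--     return [len(tok) if tok[0] == '#' else None for tok in tokens]
-- ===== Notes on version B (the rewrite author's own statement) =====
-- stated objective: alternative
-- what changed: B first tokenizes the string into maximal hash-runs and single other characters, then maps each token to its length or None, replacing the char-by-char counter state machine with flush logic.
import Mathlib
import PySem

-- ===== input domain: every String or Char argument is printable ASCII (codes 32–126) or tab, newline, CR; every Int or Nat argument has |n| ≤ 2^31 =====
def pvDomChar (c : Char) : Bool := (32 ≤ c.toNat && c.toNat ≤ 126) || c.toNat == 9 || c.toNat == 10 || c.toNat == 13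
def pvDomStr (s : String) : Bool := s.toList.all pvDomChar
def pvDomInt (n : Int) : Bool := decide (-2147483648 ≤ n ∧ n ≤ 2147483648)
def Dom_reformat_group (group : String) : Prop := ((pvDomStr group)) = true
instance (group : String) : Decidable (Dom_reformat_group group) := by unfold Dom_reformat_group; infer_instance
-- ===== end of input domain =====

-- B tokenizes the string into maximal hash-runs and single other characters, then maps
-- each token to its length or none; A is a char-by-char counter state machine.

-- ===== PORT A =====
-- for c in group: update (options, count); then the final flush of count
def reformat_group (group : String) : List (Option Int) :=
  let st := group.toList.foldl
    (fun (st : List (Option Int) × Int) c =>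
      if c = '#' then (st.1, st.2 + 1)
      else ((if st.2 > 0 then st.1 ++ [some st.2] else st.1) ++ [none], 0))
    ([], 0)
  if st.2 > 0 then st.1 ++ [some st.2] else st.1

-- ===== PORT B =====
-- the outer while-loop of Source B: emit the maximal '#' run starting at i, or the single char
def pvTokenize : List Char → List (List Char)
  | [] => []
  | c :: cs =>
    if c = '#' then
      ((c :: cs).takeWhile (· = '#')) :: pvTokenize ((c :: cs).dropWhile (· = '#'))
    else
      [c] :: pvTokenize cs
termination_by cs => cs.length
decreasing_by
  · simp only [List.dropWhile]
    simp_all only [decide_true]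
    exact Nat.lt_succ_of_le (List.length_dropWhile_le _ _)
  · simp

-- Source B's final comprehension: tok[0] is tok.headD ' ' (tokens are always nonempty, so the default is never used)
def reformat_group_alt (group : String) : List (Option Int) :=
  (pvTokenize group.toList).map
    (fun tok => if tok.headD ' ' = '#' then some (tok.length : Int) else none)

-- ===== PRECONDITION & SPEC =====
def Spec_reformat_group (group : String) (out : List (Option Int)) : Prop := out = reformat_group_alt group
instance (group : String) (out : List (Option Int)) : Decidable (Spec_reformat_group group out) := by unfold Spec_reformat_group; infer_instance

-- ===== CLAIM (what is proved, stated in full; the proofs are below) =====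
def Claim_equal_reformat_group : Prop := ∀ (group : String), Dom_reformat_group group → Spec_reformat_group group (reformat_group group)

-- ===== LEMMAS AND PROOFS =====

-- A's loop step and final flush, named for the lemmas
def pvStepA (st : List (Option Int) × Int) (c : Char) : List (Option Int) × Int :=
  if c = '#' then (st.1, st.2 + 1)
  else ((if st.2 > 0 then st.1 ++ [some st.2] else st.1) ++ [none], 0)

def pvFinish (st : List (Option Int) × Int) : List (Option Int) :=
  if st.2 > 0 then st.1 ++ [some st.2] else st.1

-- common functional form: pvF count cs = the rest of A's output from counter state count
def pvF : Int → List Char → List (Option Int)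
  | count, [] => if count > 0 then [some count] else []
  | count, c :: cs =>
    if c = '#' then pvF (count + 1) cs
    else (if count > 0 then [some count] else []) ++ none :: pvF 0 cs

lemma A_eq_f (cs : List Char) : ∀ (opts : List (Option Int)) (count : Int),
    pvFinish (cs.foldl pvStepA (opts, count)) = opts ++ pvF count cs := by
  induction cs with
  | nil =>
    intro opts count
    simp only [List.foldl_nil, pvFinish, pvF]
    split_ifs <;> simp
  | cons c cs ih =>
    intro opts count
    by_cases hc : c = '#'
    · rw [show (c :: cs).foldl pvStepA (opts, count) = cs.foldl pvStepA (opts, count + 1) by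
        simp [pvStepA, hc], ih]
      simp [pvF, hc]
    · rw [show (c :: cs).foldl pvStepA (opts, count)
          = cs.foldl pvStepA ((if count > 0 then opts ++ [some count] else opts) ++ [none], 0) by
        simp [pvStepA, hc], ih]
      rw [show pvF count (c :: cs) = (if count > 0 then [some count] else []) ++ none :: pvF 0 cs by
        simp [pvF, hc]]
      split_ifs <;> simp

lemma f_replicate (m : Nat) (d : List Char) : ∀ (j : Int),
    pvF j (List.replicate m '#' ++ d) = pvF (j + m) d := by
  induction m with
  | zero => intro j; simp
  | succ m ih =>
    intro j
    rw [show List.replicate (m + 1) '#' ++ d = '#' :: (List.replicate m '#' ++ d) by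
      simp [List.replicate_succ],
        show pvF j ('#' :: (List.replicate m '#' ++ d)) = pvF (j + 1) (List.replicate m '#' ++ d) by
      simp [pvF]]
    rw [ih]
    congr 1
    push_cast
    ring

lemma B_eq_f (cs : List Char) :
    (pvTokenize cs).map (fun tok => if tok.headD ' ' = '#' then some (tok.length : Int) else none)
      = pvF 0 cs := by
  induction cs using pvTokenize.induct with
  | case1 => simp [pvTokenize, pvF]
  | case2 cs ih =>
    have htw : ('#' :: cs).takeWhile (· = '#')
        = List.replicate (('#' :: cs).takeWhile (· = '#')).length '#' := by
      rw [List.eq_replicate_iff]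
      refine ⟨rfl, fun b hb => ?_⟩
      simpa using List.mem_takeWhile_imp hb
    have hlen : 0 < (('#' :: cs).takeWhile (· = '#')).length := by
      simp [List.takeWhile]
    rw [show pvTokenize ('#' :: cs)
        = (('#' :: cs).takeWhile (· = '#')) :: pvTokenize (('#' :: cs).dropWhile (· = '#')) by
      rw [pvTokenize]; simp]
    rw [List.map_cons, ih]
    have hd : pvF 0 ('#' :: cs)
        = pvF 0 (List.replicate (('#' :: cs).takeWhile (· = '#')).length '#'
            ++ ('#' :: cs).dropWhile (· = '#')) := by
      rw [← htw, List.takeWhile_append_dropWhile]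
    rw [hd, f_replicate]
    have hhead : (('#' :: cs).takeWhile (· = '#')).headD ' ' = '#' := by
      rw [htw]
      rcases h : (('#' :: cs).takeWhile (· = '#')).length with _ | n
      · omega
      · simp [List.replicate_succ]
    rw [hhead]
    simp only [zero_add]
    -- the dropped rest starts with a non-'#' char (or is empty)
    rcases hdw : ('#' :: cs).dropWhile (· = '#') with _ | ⟨d, ds⟩
    · simp [pvF]
    · have hdne : ¬ d = '#' := by
        have := List.head_dropWhile_not (p := (· = '#')) (l := '#' :: cs) (by simp [hdw])
        simpa [hdw] using this
      rw [show pvF (((('#' :: cs).takeWhile (· = '#')).length : Int)) (d :: ds)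
          = (if (((('#' :: cs).takeWhile (· = '#')).length : Int)) > 0
              then [some (((('#' :: cs).takeWhile (· = '#')).length : Int))] else [])
            ++ none :: pvF 0 ds by simp [pvF, hdne],
          show pvF 0 (d :: ds) = (if (0:Int) > 0 then [some 0] else []) ++ none :: pvF 0 ds by
          simp [pvF, hdne]]
      simp
  | case3 c cs hc ih =>
    rw [show pvTokenize (c :: cs) = [c] :: pvTokenize cs by rw [pvTokenize]; simp [hc]]
    rw [List.map_cons, ih,
        show pvF 0 (c :: cs) = (if (0:Int) > 0 then [some 0] else []) ++ none :: pvF 0 cs by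
        simp [pvF, hc]]
    simp [hc]

-- ===== VERDICT (by name: the statement is the Claim_ definition above) =====
theorem reformat_group_spec : Claim_equal_reformat_group := by
  intro group _
  unfold Spec_reformat_group reformat_group reformat_group_alt
  rw [B_eq_f]
  simpa [pvFinish, pvStepA] using A_eq_f group.toList [] 0
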